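-- pv_equiv track=rewrite | github.com/camillefossier/Weeabot-Et4 | src/mode3.py | in_manga_list
-- ===== SOURCE A (Python) =====
-- def in_manga_list(m, arr, g):
-- 	for a in arr:
-- 		try:
-- 			if a[0].lower()==g.lower():
-- 				for i in a[1]:
-- 					if m.lower()==i.lower():
-- 						return True
-- 		except:
-- 			1
-- 	return False
-- ===== SOURCE B (Python) =====
-- def in_manga_list(m, arr, g):
--     index = {}
--     for a in arr:
--         index.setdefault(a[0].lower(), set()).update(t.lower() for t in a[1])
--     return m.lower() in index.get(g.lower(), set())
-- ===== Notes on version B (the rewrite author's own statement) =====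
-- stated objective: alternative
-- what changed: Replaces A's nested short-circuit scan with a single pass that builds a dict mapping lowercased genre to the set of lowercased titles, followed by one membership lookup.
import Mathlib
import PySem

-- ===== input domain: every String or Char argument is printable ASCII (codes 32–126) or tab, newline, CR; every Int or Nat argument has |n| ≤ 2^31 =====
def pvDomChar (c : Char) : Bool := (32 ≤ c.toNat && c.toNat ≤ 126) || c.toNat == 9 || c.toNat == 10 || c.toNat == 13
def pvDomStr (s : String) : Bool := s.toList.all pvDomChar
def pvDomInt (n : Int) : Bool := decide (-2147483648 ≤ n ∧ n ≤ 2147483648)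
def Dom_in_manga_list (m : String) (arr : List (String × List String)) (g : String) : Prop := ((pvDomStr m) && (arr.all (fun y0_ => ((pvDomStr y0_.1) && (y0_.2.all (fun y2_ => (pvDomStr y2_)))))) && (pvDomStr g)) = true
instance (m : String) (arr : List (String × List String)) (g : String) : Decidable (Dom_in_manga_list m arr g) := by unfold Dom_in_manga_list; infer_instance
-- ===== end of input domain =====

-- B replaces A's nested short-circuit scan with a built genre→title-set index plus one lookup
-- (objective: alternative structure; same asymptotic cost). On typed inputs A's bare except never
-- fires, so A is total and the equivalence is unconditional on the domain.

-- ===== PORT A =====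
-- A's outer for-loop with early return True; the inner for-loop with early return is the 'any'.
def pvA_loop (m g : String) : List (String × List String) → Bool
  | [] => false
  | a :: rest =>
    if PySem.Str.lower a.1 == PySem.Str.lower g then
      if a.2.any (fun i => PySem.Str.lower m == PySem.Str.lower i) then true
      else pvA_loop m g rest
    else pvA_loop m g rest

def in_manga_list (m : String) (arr : List (String × List String)) (g : String) : Bool :=
  pvA_loop m g arr

-- ===== PORT B =====
-- index.setdefault(a[0].lower(), set()).update(t.lower() for t in a[1])
def pvB_step (d : PySem.Dict String (PySem.Set String)) (a : String × List String) :
    PySem.Dict String (PySem.Set String) :=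
  PySem.Dict.modify d (PySem.Str.lower a.1) PySem.Set.empty
    (fun s => PySem.Set.update s (a.2.map PySem.Str.lower))

def in_manga_list_alt (m : String) (arr : List (String × List String)) (g : String) : Bool :=
  let index := arr.foldl pvB_step PySem.Dict.empty
  PySem.Set.contains (PySem.Dict.getD index (PySem.Str.lower g) PySem.Set.empty) (PySem.Str.lower m)

-- ===== PRECONDITION & SPEC =====
def Spec_in_manga_list (m : String) (arr : List (String × List String)) (g : String) (out : Bool) : Prop := out = in_manga_list_alt m arr g
instance (m : String) (arr : List (String × List String)) (g : String) (out : Bool) : Decidable (Spec_in_manga_list m arr g out) := by unfold Spec_in_manga_list; infer_instance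

-- ===== CLAIM (what is proved, stated in full; the proofs are below) =====
def Claim_equal_in_manga_list : Prop := ∀ (m : String) (arr : List (String × List String)) (g : String), Dom_in_manga_list m arr g → Spec_in_manga_list m arr g (in_manga_list m arr g)

-- ===== LEMMAS AND PROOFS =====

-- Invariant of B's index-building fold, read back at key (lower g): membership in the final
-- entry is membership in the starting entry or a hit found by A's scan of the remaining list.
lemma pvB_fold_lookup (m g : String) (arr : List (String × List String))
    (d : PySem.Dict String (PySem.Set String)) :
    PySem.Set.contains
      (PySem.Dict.getD (arr.foldl pvB_step d) (PySem.Str.lower g) PySem.Set.empty)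
      (PySem.Str.lower m)
    = (PySem.Set.contains (PySem.Dict.getD d (PySem.Str.lower g) PySem.Set.empty)
        (PySem.Str.lower m) || pvA_loop m g arr) := by
  induction arr generalizing d with
  | nil => simp [pvA_loop]
  | cons a rest ih =>
    simp only [List.foldl_cons, ih, pvA_loop, pvB_step, PySem.Dict.getD_modify]
    by_cases h : PySem.Str.lower g = PySem.Str.lower a.1
    · rw [if_pos h, h]
      have hupd : (PySem.Set.update (PySem.Dict.getD d (PySem.Str.lower a.1) PySem.Set.empty)
            (a.2.map PySem.Str.lower)).contains (PySem.Str.lower m)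
          = ((PySem.Dict.getD d (PySem.Str.lower a.1) PySem.Set.empty).contains (PySem.Str.lower m)
              || a.2.any (fun i => PySem.Str.lower m == PySem.Str.lower i)) := by
        rw [Bool.eq_iff_iff]
        simp only [PySem.Set.contains_iff, Bool.or_eq_true, List.any_eq_true, beq_iff_eq,
          PySem.Set.mem_update, List.mem_map]
        tauto
      cases hany : a.2.any (fun i => PySem.Str.lower m == PySem.Str.lower i) <;>
        rw [hupd, hany] <;> simp
    · have hb : (PySem.Str.lower a.1 == PySem.Str.lower g) = false := by
        simp only [beq_eq_false_iff_ne, ne_eq]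
        exact fun e => h e.symm
      rw [if_neg h, hb]
      simp

-- ===== VERDICT (by name: the statement is the Claim_ definition above) =====
theorem in_manga_list_spec : Claim_equal_in_manga_list := by
  intro m arr g _
  unfold Spec_in_manga_list in_manga_list in_manga_list_alt
  rw [pvB_fold_lookup]
  simp [PySem.Dict.getD_empty, PySem.Set.empty, PySem.Set.contains]
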